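-- pv_equiv track=rewrite | github.com/ymaeda880/minutes-app | lib/docx_minutes_export.py | _split_md_cells
-- ===== SOURCE A (Python) =====
-- from typing import Optional, Tuple, List
--
-- def _split_md_cells(line: str) -> List[str]:
--     """
--     1 行の Markdown 風テーブル行をセルに分割する。
--     - 先頭/末尾の | は無視
--     - セル内の \| は「|」として扱う
--     """
--     s = line.strip("\n").rstrip()
--     # 先頭・末尾の | は削る（あれば）
--     if s.startswith("|"):
--         s = s[1:]
--     if s.endswith("|"):
--         s = s[:-1]
--
--     cells: List[str] = []
--     buf: List[str] = []
--     escaped = False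
--
--     for ch in s:
--         if escaped:
--             # 直前がバックスラッシュならそのまま文字として追加
--             buf.append(ch)
--             escaped = False
--             continue
--
--         if ch == "\\":
--             escaped = True
--             continue
--
--         if ch == "|":
--             # セル区切り
--             cell = "".join(buf).strip()
--             cells.append(cell if cell != "" else " ")
--             buf = []
--         else:
--             buf.append(ch)
--
--     # 最後のセル
--     cell = "".join(buf).strip()
--     cells.append(cell if cell != "" else " ")
--
--     return cells
-- ===== SOURCE B (Python) =====
-- def _split_md_cells(line: str) -> list:
--     s = line.strip("\n").rstrip()
--     if s.startswith("|"):
--         s = s[1:]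
--     if s.endswith("|"):
--         s = s[:-1]
--     # Tokenize: resolve escapes (backslash consumes the next char), mark
--     # unescaped pipes with a NUL sentinel, then split with str.split.
--     out = []
--     i = 0
--     n = len(s)
--     while i < n:
--         ch = s[i]
--         if ch == "\\":
--             if i + 1 < n:
--                 out.append(s[i + 1])
--             i += 2
--         elif ch == "|":
--             out.append("\x00")
--             i += 1
--         else:
--             out.append(ch)
--             i += 1
--     return [(c.strip() or " ") for c in "".join(out).split("\x00")]
-- ===== Notes on version B (the rewrite author's own statement) =====
-- stated objective: idiomatic
-- what changed: Replaces A's single-pass escaped-flag state machine (cells/buf accumulators) with a two-phase tokenize-then-split: an index-jumping unescaper resolves each backslash pair and marks unescaped pipes with a NUL sentinel, then the library str.split and a comprehension produce the cells.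
import Mathlib
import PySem

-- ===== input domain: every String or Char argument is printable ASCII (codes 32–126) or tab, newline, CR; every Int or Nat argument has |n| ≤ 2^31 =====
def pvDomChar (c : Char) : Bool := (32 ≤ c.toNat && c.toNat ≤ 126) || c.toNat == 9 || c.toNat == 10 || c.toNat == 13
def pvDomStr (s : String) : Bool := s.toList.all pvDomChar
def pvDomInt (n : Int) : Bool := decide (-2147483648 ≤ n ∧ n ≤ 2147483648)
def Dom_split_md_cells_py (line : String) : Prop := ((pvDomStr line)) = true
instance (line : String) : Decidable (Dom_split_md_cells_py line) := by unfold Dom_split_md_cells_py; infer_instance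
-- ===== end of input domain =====

-- B replaces A's escaped-flag state machine with a tokenize-then-library-split phase pair (idiomatic; same cost).

-- shared preprocessing: both Pythons begin with the identical four lines
-- s = line.strip("\n").rstrip(); drop one leading '|'; drop one trailing '|'
def pvPrep (line : String) : List Char :=
  let s0 := PySem.Chars.rstrip (PySem.Chars.stripChars line.toList ['\n'])
  let s1 := if PySem.Chars.startswith s0 ['|'] then PySem.List.slice s0 (some 1) none else s0
  if PySem.Chars.endswith s1 ['|'] then PySem.List.slice s1 none (some (-1)) else s1

-- ===== PORT A =====
-- cell = "".join(buf).strip(); cells.append(cell if cell != "" else " ")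
def pvCleanA (buf : List Char) : String :=
  let cell := PySem.Chars.strip buf
  if cell = [] then " " else String.ofList cell

-- A's for-loop over s with state (cells, buf, escaped), plus the final cell append
def pvGoA : List Char → List String → List Char → Bool → List String
  | [], cells, buf, _ => cells ++ [pvCleanA buf]
  | ch :: rest, cells, buf, escaped =>
    if escaped then pvGoA rest cells (buf ++ [ch]) false
    else if ch = '\\' then pvGoA rest cells buf true
    else if ch = '|' then pvGoA rest (cells ++ [pvCleanA buf]) [] false
    else pvGoA rest cells (buf ++ [ch]) false

def split_md_cells_py (line : String) : List String :=
  pvGoA (pvPrep line) [] [] false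

-- ===== PORT B =====
def pvNul : Char := Char.ofNat 0

-- B's while-loop tokenizer: a backslash consumes the next char, an unescaped '|' becomes the NUL marker
def pvTokB : List Char → List Char
  | [] => []
  | ch :: rest =>
    if ch = '\\' then
      match rest with
      | [] => []
      | d :: rest' => d :: pvTokB rest'
    else if ch = '|' then pvNul :: pvTokB rest
    else ch :: pvTokB rest

-- (c.strip() or " ")
def pvCleanB (cell : List Char) : String :=
  let t := PySem.Chars.strip cell
  if t = [] then " " else String.ofList t

def split_md_cells_py_alt (line : String) : List String :=
  (PySem.Chars.splitOn (pvTokB (pvPrep line)) [pvNul]).map pvCleanB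

-- ===== PRECONDITION & SPEC =====
def Spec_split_md_cells_py (line : String) (out : List String) : Prop := out = split_md_cells_py_alt line
instance (line : String) (out : List String) : Decidable (Spec_split_md_cells_py line out) := by unfold Spec_split_md_cells_py; infer_instance

-- ===== CLAIM (what is proved, stated in full; the proofs are below) =====
def Claim_equal_split_md_cells_py : Prop := ∀ (line : String), Dom_split_md_cells_py line → Spec_split_md_cells_py line (split_md_cells_py line)

-- ===== LEMMAS AND PROOFS =====

-- simple recursive characterization of splitting a char list at the NUL marker
def pvMySplit : List Char → List (List Char)
  | [] => [[]]
  | c :: t => if c = pvNul then [] :: pvMySplit t else (pvMySplit t).modifyHead (c :: ·)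

theorem pvMySplit_ne_nil (l : List Char) : pvMySplit l ≠ [] := by
  cases l with
  | nil => simp [pvMySplit]
  | cons c t =>
    simp only [pvMySplit]
    split_ifs
    · simp
    · intro h
      have := congrArg List.length h
      simp at this
      exact pvMySplit_ne_nil t this

theorem pvModifyHead_nil_append (xs : List (List Char)) :
    xs.modifyHead (([] : List Char) ++ ·) = xs := by
  cases xs <;> simp

theorem pvModifyHead_id {α : Type} (xs : List α) :
    List.modifyHead (fun x => x) xs = xs := by
  cases xs <;> simp

theorem pvGo_eq (l : List Char) : ∀ (fuel : Nat) (cur : List Char) (acc : List (List Char)),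
    l.length < fuel →
    PySem.Chars.splitOn.go [pvNul] fuel l cur acc
      = acc.reverse ++ ((pvMySplit l).modifyHead (cur.reverse ++ ·)) := by
  induction l with
  | nil =>
    intro fuel cur acc h
    match fuel with
    | f + 1 => simp [PySem.Chars.splitOn.go, pvMySplit]
  | cons c t ih =>
    intro fuel cur acc h
    match fuel with
    | f + 1 =>
      have ht : t.length < f := by simpa using h
      rw [PySem.Chars.splitOn.go]
      by_cases hc : c = pvNul
      · subst hc
        simp only [List.isPrefixOf, BEq.rfl, Bool.true_and, if_pos]
        rw [show List.drop [pvNul].length (pvNul :: t) = t from rfl,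
            ih f [] (cur.reverse :: acc) ht]
        simp [pvMySplit, pvModifyHead_id]
      · have hpre : [pvNul].isPrefixOf (c :: t) = false := by
          simp [List.isPrefixOf]
          exact fun h' => absurd h'.symm hc
        rw [hpre]
        simp only [Bool.false_eq_true, if_false]
        rw [ih f (c :: cur) acc ht]
        obtain ⟨hd, tl, hm⟩ : ∃ hd tl, pvMySplit t = hd :: tl := by
          cases hmt : pvMySplit t with
          | nil => exact absurd hmt (pvMySplit_ne_nil t)
          | cons hd tl => exact ⟨hd, tl, rfl⟩
        simp [pvMySplit, hc, hm]

theorem pvSplitOn_eq_mySplit (l : List Char) :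
    PySem.Chars.splitOn l [pvNul] = pvMySplit l := by
  rw [PySem.Chars.splitOn, pvGo_eq l (l.length + 1) [] [] (by omega)]
  simpa using pvModifyHead_nil_append (pvMySplit l)

theorem pvTokB_pipe (rest : List Char) : pvTokB ('|' :: rest) = pvNul :: pvTokB rest := by
  rw [pvTokB.eq_def]; simp

theorem pvTokB_cons (ch : Char) (rest : List Char) (hb : ch ≠ '\\') (hp : ch ≠ '|') :
    pvTokB (ch :: rest) = ch :: pvTokB rest := by
  rw [pvTokB.eq_def]; simp [hb, hp]

theorem pvGoA_eq : ∀ (n : Nat) (cs : List Char), cs.length ≤ n → ∀ (cells : List String) (buf : List Char),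
    pvNul ∉ cs →
    pvGoA cs cells buf false
      = cells ++ ((pvMySplit (pvTokB cs)).modifyHead (buf ++ ·)).map pvCleanB := by
  intro n
  induction n with
  | zero =>
    intro cs hlen cells buf _
    have : cs = [] := List.length_eq_zero_iff.mp (Nat.le_zero.mp hlen)
    subst this
    simp [pvGoA, pvTokB, pvMySplit, pvCleanA, pvCleanB]
  | succ n ih =>
    intro cs hlen cells buf hmem
    cases cs with
    | nil => simp [pvGoA, pvTokB, pvMySplit, pvCleanA, pvCleanB]
    | cons ch rest =>
      have hch : ch ≠ pvNul := by
        intro h; exact hmem (h ▸ List.mem_cons_self)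
      have hrest : pvNul ∉ rest := fun h => hmem (List.mem_cons_of_mem _ h)
      by_cases hb : ch = '\\'
      · subst hb
        cases rest with
        | nil => simp [pvGoA, pvTokB, pvMySplit, pvCleanA, pvCleanB]
        | cons d rest' =>
          have hd : d ≠ pvNul := by
            intro h; exact hrest (h ▸ List.mem_cons_self)
          have hr' : pvNul ∉ rest' := fun h => hrest (List.mem_cons_of_mem _ h)
          have hl : rest'.length ≤ n := by simp at hlen; omega
          have step : pvGoA ('\\' :: d :: rest') cells buf false
              = pvGoA rest' cells (buf ++ [d]) false := by simp [pvGoA]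
          rw [step, ih rest' hl cells (buf ++ [d]) hr']
          obtain ⟨hd', tl, hm⟩ : ∃ hd' tl, pvMySplit (pvTokB rest') = hd' :: tl := by
            cases hmt : pvMySplit (pvTokB rest') with
            | nil => exact absurd hmt (pvMySplit_ne_nil _)
            | cons x y => exact ⟨x, y, rfl⟩
          simp [pvTokB, pvMySplit, hd, hm]
      · by_cases hp : ch = '|'
        · subst hp
          have hl : rest.length ≤ n := by simpa using hlen
          have step : pvGoA ('|' :: rest) cells buf false
              = pvGoA rest (cells ++ [pvCleanA buf]) [] false := by simp [pvGoA]
          rw [step, ih rest hl (cells ++ [pvCleanA buf]) [] hrest, pvTokB_pipe]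
          simp [pvMySplit, pvModifyHead_id, pvCleanA, pvCleanB]
        · have hl : rest.length ≤ n := by simpa using hlen
          have step : pvGoA (ch :: rest) cells buf false
              = pvGoA rest cells (buf ++ [ch]) false := by simp [pvGoA, hb, hp]
          rw [step, ih rest hl cells (buf ++ [ch]) hrest, pvTokB_cons ch rest hb hp]
          obtain ⟨hd', tl, hm⟩ : ∃ hd' tl, pvMySplit (pvTokB rest) = hd' :: tl := by
            cases hmt : pvMySplit (pvTokB rest) with
            | nil => exact absurd hmt (pvMySplit_ne_nil _)
            | cons x y => exact ⟨x, y, rfl⟩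
          simp [pvMySplit, hch, hm]

theorem pvMem_rstrip {c : Char} {s : List Char} (h : c ∈ PySem.Chars.rstrip s) : c ∈ s := by
  unfold PySem.Chars.rstrip at h
  rw [List.mem_reverse] at h
  have := (List.dropWhile_sublist _).subset h
  rwa [List.mem_reverse] at this

theorem pvMem_stripChars {c : Char} {s ks : List Char} (h : c ∈ PySem.Chars.stripChars s ks) :
    c ∈ s := by
  unfold PySem.Chars.stripChars at h
  rw [List.mem_reverse] at h
  have h2 := (List.dropWhile_sublist _).subset h
  rw [List.mem_reverse] at h2
  exact (List.dropWhile_sublist _).subset h2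

theorem pvMem_ite_slice {c : Char} {s : List Char} {b : Bool} {a? b? : Option Int}
    (h : c ∈ if b = true then PySem.List.slice s a? b? else s) : c ∈ s := by
  split at h
  · exact PySem.List.mem_of_mem_slice _ _ _ h
  · exact h

theorem pvNul_not_mem_prep (line : String) (h : Dom_split_md_cells_py line) :
    pvNul ∉ pvPrep line := by
  intro hmem
  have hline : pvNul ∈ line.toList := by
    have h2 : pvNul ∈
        (if PySem.Chars.startswith
              (PySem.Chars.rstrip (PySem.Chars.stripChars line.toList ['\n'])) ['|'] = true then
          PySem.List.slice (PySem.Chars.rstrip (PySem.Chars.stripChars line.toList ['\n'])) (some 1) none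
        else PySem.Chars.rstrip (PySem.Chars.stripChars line.toList ['\n'])) :=
      pvMem_ite_slice hmem
    exact pvMem_stripChars (pvMem_rstrip (pvMem_ite_slice h2))
  have hall := (List.all_eq_true.mp h) pvNul hline
  simp [pvDomChar, pvNul] at hall

-- ===== VERDICT (by name: the statement is the Claim_ definition above) =====
theorem split_md_cells_py_spec : Claim_equal_split_md_cells_py := by
  intro line hdom
  unfold Spec_split_md_cells_py split_md_cells_py split_md_cells_py_alt
  rw [pvSplitOn_eq_mySplit,
      pvGoA_eq (pvPrep line).length _ le_rfl _ _ (pvNul_not_mem_prep line hdom)]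
  simp [pvModifyHead_id]
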